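-- pv_equiv track=rewrite | github.com/RichardHam-co-uk/ProjectMemento | vault/cli/main.py | _passphrase_strength
-- ===== SOURCE A (Python) =====
-- def _passphrase_strength(passphrase: str) -> str:
--     """Return a simple strength label ('WEAK', 'MODERATE', or 'STRONG').
--
--     Args:
--         passphrase: The passphrase to evaluate.
--
--     Returns:
--         Strength label string.
--     """
--     length = len(passphrase)
--     variety = sum([
--         any(c.isupper() for c in passphrase),
--         any(c.islower() for c in passphrase),
--         any(c.isdigit() for c in passphrase),
--         any(not c.isalnum() for c in passphrase),
--     ])
--     if length >= 20 and variety >= 3: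
--         return "STRONG"
--     if length >= 16 and variety >= 2:
--         return "MODERATE"
--     return "WEAK"
-- ===== SOURCE B (Python) =====
-- def _passphrase_strength(passphrase: str) -> str:
--     """Single pass over the passphrase, OR-accumulating class-presence flags."""
--     has_upper = has_lower = has_digit = has_other = False
--     for c in passphrase:
--         has_upper = has_upper or c.isupper()
--         has_lower = has_lower or c.islower()
--         has_digit = has_digit or c.isdigit()
--         has_other = has_other or (not c.isalnum())
--     variety = has_upper + has_lower + has_digit + has_other
--     length = len(passphrase)
--     if length >= 20 and variety >= 3:
--         return "STRONG"
--     if length >= 16 and variety >= 2: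
--         return "MODERATE"
--     return "WEAK"
-- ===== Notes on version B (the rewrite author's own statement) =====
-- stated objective: alternative
-- what changed: Replaces the four separate any()-scans over the passphrase with one single loop that OR-accumulates four class-presence flags, then sums them.
import Mathlib
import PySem

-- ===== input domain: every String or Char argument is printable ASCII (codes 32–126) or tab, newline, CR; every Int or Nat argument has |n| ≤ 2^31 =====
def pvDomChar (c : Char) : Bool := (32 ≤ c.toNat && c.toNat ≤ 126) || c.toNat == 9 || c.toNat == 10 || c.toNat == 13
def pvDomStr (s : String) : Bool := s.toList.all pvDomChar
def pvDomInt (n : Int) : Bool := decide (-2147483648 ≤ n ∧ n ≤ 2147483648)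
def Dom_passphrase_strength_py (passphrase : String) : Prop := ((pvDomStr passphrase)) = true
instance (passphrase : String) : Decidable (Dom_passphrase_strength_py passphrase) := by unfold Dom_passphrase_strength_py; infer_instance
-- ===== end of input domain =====

-- B replaces A's four separate any()-scans by one single pass OR-accumulating four class flags (alternative decomposition, same cost).


-- ===== PORT A =====
def passphrase_strength_py (passphrase : String) : String :=
  let cs := passphrase.toList
  let length : Int := (PySem.Str.len passphrase : Int)
  let variety : Int :=
    (if cs.any PySem.Chars.isupper then 1 else 0) +
    (if cs.any PySem.Chars.islower then 1 else 0) +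
    (if cs.any PySem.Chars.isdigit then 1 else 0) +
    (if cs.any (fun c => !PySem.Chars.isalnum c) then 1 else 0)
  if length ≥ 20 ∧ variety ≥ 3 then "STRONG"
  else if length ≥ 16 ∧ variety ≥ 2 then "MODERATE"
  else "WEAK"

-- ===== PORT B =====
def pbStep (s : Bool × Bool × Bool × Bool) (c : Char) : Bool × Bool × Bool × Bool :=
  (s.1 || PySem.Chars.isupper c,
   s.2.1 || PySem.Chars.islower c,
   s.2.2.1 || PySem.Chars.isdigit c,
   s.2.2.2 || !PySem.Chars.isalnum c)

def passphrase_strength_py_alt (passphrase : String) : String :=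
  let f := passphrase.toList.foldl pbStep (false, false, false, false)
  let variety : Int :=
    (if f.1 then 1 else 0) + (if f.2.1 then 1 else 0) +
    (if f.2.2.1 then 1 else 0) + (if f.2.2.2 then 1 else 0)
  let length : Int := (PySem.Str.len passphrase : Int)
  if length ≥ 20 ∧ variety ≥ 3 then "STRONG"
  else if length ≥ 16 ∧ variety ≥ 2 then "MODERATE"
  else "WEAK"

-- ===== PRECONDITION & SPEC =====
def Spec_passphrase_strength_py (passphrase : String) (out : String) : Prop := out = passphrase_strength_py_alt passphrase
instance (passphrase : String) (out : String) : Decidable (Spec_passphrase_strength_py passphrase out) := by unfold Spec_passphrase_strength_py; infer_instance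

-- ===== CLAIM (what is proved, stated in full; the proofs are below) =====
def Claim_equal_passphrase_strength_py : Prop := ∀ (passphrase : String), Dom_passphrase_strength_py passphrase → Spec_passphrase_strength_py passphrase (passphrase_strength_py passphrase)

-- ===== LEMMAS AND PROOFS =====
theorem pbStep_foldl (cs : List Char) (s : Bool × Bool × Bool × Bool) :
    cs.foldl pbStep s =
      (s.1 || cs.any PySem.Chars.isupper,
       s.2.1 || cs.any PySem.Chars.islower,
       s.2.2.1 || cs.any PySem.Chars.isdigit,
       s.2.2.2 || cs.any (fun c => !PySem.Chars.isalnum c)) := by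
  induction cs generalizing s with
  | nil => simp
  | cons c cs ih =>
    simp [List.foldl_cons, ih, pbStep, Bool.or_assoc]

-- ===== VERDICT (by name: the statement is the Claim_ definition above) =====
theorem passphrase_strength_py_spec : Claim_equal_passphrase_strength_py := by
  intro p _
  unfold Spec_passphrase_strength_py passphrase_strength_py passphrase_strength_py_alt
  simp [pbStep_foldl]
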